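-- pv_equiv track=rewrite | github.com/e-remington-lee/complex-problems | arrays/subarray_sum.py | answer
-- ===== SOURCE A (Python) =====
-- def answer(nums):
--     if len(nums) < 3:
--         return 0
--     nums.sort()
--     response = 0
--     for i in range(len(nums) - 2):
--         left_sum = sum(nums[:i + 1])
--         right_sum = sum(nums[i + 1:])
--         '''
--         I started with backtracking, which I think can work
--         but I realized that if it is sorted, and I know the left sum <= right sum, then I can just find the combinations of numbers on the right
--         and add that to the response, bc that is how many combinations there will be
--         2, 3, 5, 7
--         2 as left sum, we have 3 5 7, which can be 3, 5 7, or 3 5 , 7. it is 1 less than the length of the numbers. So do that!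
--         '''
--         if left_sum <= right_sum:
--             response += len(nums) - i - 2
--     return response
-- ===== SOURCE B (Python) =====
-- def answer(nums):
--     n = len(nums)
--     if n < 3:
--         return 0
--     s = sorted(nums)
--     total = sum(s)
--     resp = 0
--     left = 0
--     for i, x in enumerate(s[: n - 2]):
--         left += x
--         if 2 * left <= total:
--             resp += n - i - 2
--     return resp
-- ===== Notes on version B (the rewrite author's own statement) =====
-- stated objective: faster
-- what changed: Replaces the per-split re-summing of both halves (sum(nums[:i+1]) and sum(nums[i+1:]) at every i) by one precomputed total and a running left prefix sum, testing 2*left <= total in a single pass over the sorted list.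
import Mathlib
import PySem

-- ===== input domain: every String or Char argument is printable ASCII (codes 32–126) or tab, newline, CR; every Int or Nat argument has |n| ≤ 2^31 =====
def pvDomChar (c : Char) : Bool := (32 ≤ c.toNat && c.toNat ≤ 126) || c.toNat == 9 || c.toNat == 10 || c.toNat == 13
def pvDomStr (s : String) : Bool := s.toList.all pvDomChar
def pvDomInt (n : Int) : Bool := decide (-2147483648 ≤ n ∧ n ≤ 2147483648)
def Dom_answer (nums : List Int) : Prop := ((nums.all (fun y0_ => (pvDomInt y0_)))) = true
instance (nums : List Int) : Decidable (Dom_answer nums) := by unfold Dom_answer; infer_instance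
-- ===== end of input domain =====

-- B replaces A's per-split re-summing of both halves by a precomputed total and a running
-- prefix sum (one pass after sorting).
-- NOTE: Python A sorts `nums` IN PLACE (observable mutation); B does not mutate its argument.
-- The equivalence proved here is about the RETURN value only.

-- ===== PORT A =====
def answer (nums : List Int) : Int :=
  if nums.length < 3 then 0
  else
    let s := PySem.List.sorted nums (fun x => x) false
    (PySem.List.pyRange 0 ((nums.length : Int) - 2) 1).foldl
      (fun resp i =>
        let left_sum := (PySem.List.slice s none (some (i + 1))).sum
        let right_sum := (PySem.List.slice s (some (i + 1)) none).sum
        if left_sum ≤ right_sum then resp + ((nums.length : Int) - i - 2) else resp) 0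

-- ===== PORT B =====
def answer_alt (nums : List Int) : Int :=
  let n := nums.length
  if n < 3 then 0
  else
    let s := PySem.List.sorted nums (fun x => x) false
    let total := s.sum
    let r := (PySem.List.enumerate (PySem.List.slice s none (some ((n : Int) - 2)))).foldl
      (fun (acc : Int × Int) ix =>
        let left := acc.2 + ix.2
        (if 2 * left ≤ total then acc.1 + ((n : Int) - ix.1 - 2) else acc.1, left))
      (0, 0)
    r.1

-- ===== PRECONDITION & SPEC =====
def Spec_answer (nums : List Int) (out : Int) : Prop := out = answer_alt nums
instance (nums : List Int) (out : Int) : Decidable (Spec_answer nums out) := by unfold Spec_answer; infer_instance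

-- ===== CLAIM (what is proved, stated in full; the proofs are below) =====
def Claim_equal_answer : Prop := ∀ (nums : List Int), Dom_answer nums → Spec_answer nums (answer nums)

-- ===== LEMMAS AND PROOFS =====

-- B's loop: folding the running pair (resp, left) over `enumerate l k` yields
-- resp plus the sum of the per-index contributions (prefix sums of l shifted by `left`).
theorem altFold (total nI : Int) (l : List Int) : ∀ (k resp left : Int),
    ((PySem.List.enumerate l k).foldl
      (fun (acc : Int × Int) ix =>
        let lf := acc.2 + ix.2
        (if 2 * lf ≤ total then acc.1 + (nI - ix.1 - 2) else acc.1, lf))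
      (resp, left)).1
    = resp + ((List.range l.length).map
        (fun j => if 2 * (left + (l.take (j + 1)).sum) ≤ total
                  then nI - (k + (j : Int)) - 2 else 0)).sum := by
  induction l with
  | nil => intro k resp left; simp [PySem.List.enumerate]
  | cons x t ih =>
    intro k resp left
    have hen : PySem.List.enumerate (x :: t) k = (k, x) :: PySem.List.enumerate t (k + 1) := by
      simp [PySem.List.enumerate]
    rw [hen, List.foldl_cons]
    show ((PySem.List.enumerate t (k + 1)).foldl _
        ((if 2 * (left + x) ≤ total then resp + (nI - k - 2) else resp), left + x)).1 = _
    rw [ih (k + 1)]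
    rw [List.length_cons, List.range_succ_eq_map, List.map_cons, List.sum_cons, List.map_map]
    have hmap : ∀ j ∈ List.range t.length,
        (fun j => if 2 * ((left + x) + (t.take (j + 1)).sum) ≤ total
                  then nI - (k + 1 + (j : Int)) - 2 else 0) j
        = ((fun j => if 2 * (left + ((x :: t).take (j + 1)).sum) ≤ total
                  then nI - (k + (j : Int)) - 2 else 0) ∘ Nat.succ) j := by
      intro j hj
      simp only [Function.comp, Nat.succ_eq_add_one, List.take_succ_cons, List.sum_cons]
      have h1 : left + (x + (t.take (j + 1)).sum) = left + x + (t.take (j + 1)).sum := by ring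
      have h2 : nI - (k + ((j : Int) + 1)) - 2 = nI - (k + 1 + (j : Int)) - 2 := by ring
      push_cast
      rw [h1, h2]
    rw [← List.map_congr_left hmap]
    simp only [List.take_succ_cons, List.take_zero, List.sum_cons, List.sum_nil,
      Nat.cast_zero, add_zero]
    split_ifs with hc <;> ring

-- ===== VERDICT (by name: the statement is the Claim_ definition above) =====
theorem answer_spec : Claim_equal_answer := by
  intro nums _
  unfold Spec_answer answer answer_alt
  by_cases h : nums.length < 3
  · simp [h]
  · simp only [h, if_false]
    have hn : 3 ≤ nums.length := by omega
    set s := PySem.List.sorted nums (fun x => x) false with hs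
    have hlen : s.length = nums.length := PySem.List.length_sorted nums _ false
    -- B side: the slice is a take, then altFold turns the loop into a sum
    have hcast : ((nums.length : Int) - 2) = ((nums.length - 2 : Nat) : Int) := by omega
    rw [hcast, PySem.List.slice_to_natCast, altFold]
    have hlen2 : (s.take (nums.length - 2)).length = nums.length - 2 := by
      rw [List.length_take]; omega
    rw [hlen2]
    -- A side: pyRange is a map over range, the loop is a sum
    rw [PySem.List.pyRange_one, List.foldl_map]
    have hA : ∀ (resp : Int) (k : Nat),
        (fun (resp : Int) (i : Int) =>
          if (PySem.List.slice s none (some (i + 1))).sum ≤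
             (PySem.List.slice s (some (i + 1)) none).sum
          then resp + ((nums.length : Int) - i - 2) else resp) resp ((0 : Int) + (k : Nat))
        = resp + (if (s.take (k + 1)).sum ≤ (s.drop (k + 1)).sum
                  then (nums.length : Int) - (k : Int) - 2 else 0) := by
      intro resp k
      have hc : ((k : Int) + 1) = ((k + 1 : Nat) : Int) := by push_cast; ring
      simp only [zero_add]
      rw [hc, PySem.List.slice_to_natCast, PySem.List.slice_from_natCast]
      split_ifs <;> simp
    rw [PySem.List.foldl_congr_mem _ _
        (fun (resp : Int) (k : Nat) =>
          resp + (if (s.take (k + 1)).sum ≤ (s.drop (k + 1)).sum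
                  then (nums.length : Int) - (k : Int) - 2 else 0)) _
        (fun resp k _ => hA resp k)]
    rw [PySem.List.foldl_add]
    have hT : ((((nums.length - 2 : Nat) : Int)) - 0).toNat = nums.length - 2 := by omega
    rw [hT]
    congr 1
    refine congrArg List.sum (List.map_congr_left ?_)
    intro j hj
    have hjlt : j < nums.length - 2 := List.mem_range.mp hj
    have htt : (s.take (nums.length - 2)).take (j + 1) = s.take (j + 1) := by
      rw [List.take_take]
      congr 1
      omega
    have hsplit := List.sum_take_add_sum_drop s (j + 1)
    rw [htt]
    rw [if_congr (Q := 2 * ((0 : Int) + (s.take (j + 1)).sum) ≤ s.sum)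
        (by constructor <;> intro <;> omega) rfl rfl]
    simp
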